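-- pv_equiv track=rewrite | github.com/parad13/Competative-Coding | 1. Two pointers/is_palindrome.py | is_even_palindrome
-- ===== SOURCE A (Python) =====
-- def is_even_palindrome(s):
--     # Check if the length of the string is even
--     if len(s) % 2 != 0:
--         return False  # Not an even-length string
--
--     # Initialize two pointers
--     left = len(s) // 2 - 1  # Start at the middle-left
--     right = len(s) // 2  # Start at the middle-right
--
--     # Compare characters from the middle outwards
--     while left >= 0 and right < len(s):
--         if s[left] != s[right]:
--             return False  # Characters don't match, not a palindrome
--         left -= 1  # Move left pointer outward
--         right += 1  # Move right pointer outward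
--
--     return True  # All characters matched, it's a palindrome
-- ===== SOURCE B (Python) =====
-- def is_even_palindrome(s):
--     if len(s) % 2 != 0:
--         return False
--     return s == s[::-1]
-- ===== Notes on version B (the rewrite author's own statement) =====
-- stated objective: idiomatic
-- what changed: Replaces the middle-outward two-pointer scan with an even-length guard followed by a single reverse-and-compare of the whole string.
import Mathlib
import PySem

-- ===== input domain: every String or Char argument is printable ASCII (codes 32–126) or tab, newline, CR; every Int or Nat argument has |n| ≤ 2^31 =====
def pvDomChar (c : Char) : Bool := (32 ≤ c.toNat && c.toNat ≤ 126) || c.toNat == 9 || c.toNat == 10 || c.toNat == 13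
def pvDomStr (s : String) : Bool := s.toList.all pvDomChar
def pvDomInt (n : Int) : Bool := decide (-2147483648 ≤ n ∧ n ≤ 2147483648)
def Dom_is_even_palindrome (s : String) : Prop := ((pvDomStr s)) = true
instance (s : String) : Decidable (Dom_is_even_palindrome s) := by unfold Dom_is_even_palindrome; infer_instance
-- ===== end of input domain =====

-- B replaces A's middle-outward two-pointer scan with an even-length guard plus one
-- reverse-and-compare of the whole string (idiomatic; same behaviour on every input).

-- ===== PORT A =====
-- the while loop of A; the loop guard keeps both indices in range, so getD never
-- falls back to its default (exact w.r.t. Python's s[left]/s[right] here)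
def pvLoopA (cs : List Char) (left : Int) (right : Nat) : Bool :=
  if 0 ≤ left ∧ right < cs.length then
    if cs.getD left.toNat ' ' ≠ cs.getD right ' ' then false
    else pvLoopA cs (left - 1) (right + 1)
  else true
termination_by cs.length - right

def is_even_palindrome (s : String) : Bool :=
  if s.toList.length % 2 ≠ 0 then false
  else pvLoopA s.toList ((s.toList.length / 2 : Nat) - 1 : Int) (s.toList.length / 2)

-- ===== PORT B =====
def is_even_palindrome_alt (s : String) : Bool :=
  if s.toList.length % 2 ≠ 0 then false
  else s.toList == s.toList.reverse

-- ===== PRECONDITION & SPEC =====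
def Spec_is_even_palindrome (s : String) (out : Bool) : Prop := out = is_even_palindrome_alt s
instance (s : String) (out : Bool) : Decidable (Spec_is_even_palindrome s out) := by unfold Spec_is_even_palindrome; infer_instance

-- ===== CLAIM (what is proved, stated in full; the proofs are below) =====
def Claim_equal_is_even_palindrome : Prop := ∀ (s : String), Dom_is_even_palindrome s → Spec_is_even_palindrome s (is_even_palindrome s)

-- ===== LEMMAS AND PROOFS =====

lemma pvLoopA_eq (cs : List Char) (r : Nat) (h : r ≤ cs.length) :
    pvLoopA cs ((cs.length : Int) - 1 - r) r = (cs.drop r == cs.reverse.drop r) := by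
  rcases Nat.lt_or_ge r cs.length with hr | hr
  · rw [pvLoopA, if_pos ⟨by omega, hr⟩]
    have hidx : ((cs.length : Int) - 1 - r).toNat = cs.length - 1 - r := by omega
    have hlt : cs.length - 1 - r < cs.length := by omega
    have hrev : r < cs.reverse.length := by simpa using hr
    have hih := pvLoopA_eq cs (r + 1) (by omega)
    have harg : (cs.length : Int) - 1 - r - 1 = (cs.length : Int) - 1 - (r + 1 : Nat) := by
      push_cast; ring
    rw [hidx, harg, hih]
    have hd1 : cs.drop r = cs[r] :: cs.drop (r + 1) := (List.getElem_cons_drop hr).symm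
    have hd2 : cs.reverse.drop r = cs.reverse[r] :: cs.reverse.drop (r + 1) :=
      (List.getElem_cons_drop hrev).symm
    have hg1 : cs.getD (cs.length - 1 - r) ' ' = cs[cs.length - 1 - r] := List.getD_eq_getElem _ _ hlt
    have hg2 : cs.getD r ' ' = cs[r] := List.getD_eq_getElem _ _ hr
    have hrg : cs.reverse[r] = cs[cs.length - 1 - r] := List.getElem_reverse ..
    rw [hd1, hd2, List.cons_beq_cons, hg1, hg2, hrg]
    by_cases hc : cs[r] = cs[cs.length - 1 - r]
    · simp [hc]
    · simp [hc, Ne.symm hc]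
  · rw [pvLoopA, if_neg (by omega), List.drop_eq_nil_of_le hr,
      List.drop_eq_nil_of_le (by simpa using hr)]
    rfl
termination_by cs.length - r

lemma halves (cs : List Char) (m : Nat) (hn : cs.length = 2 * m)
    (hd : cs.drop m = cs.reverse.drop m) : cs = cs.reverse := by
  have key : ∀ j, m ≤ j → cs[j]? = cs.reverse[j]? := by
    intro j hm
    have := congrArg (fun l => l[j - m]?) hd
    simpa [List.getElem?_drop, Nat.add_sub_cancel' hm] using this
  apply List.ext_getElem (by simp)
  intro i h1 h2
  by_cases him : m ≤ i
  · have := key i him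
    rw [List.getElem?_eq_getElem h1, List.getElem?_eq_getElem h2] at this
    exact Option.some.inj this
  · have hj : m ≤ cs.length - 1 - i := by omega
    have hjlt : cs.length - 1 - i < cs.length := by omega
    have hii : cs.length - 1 - (cs.length - 1 - i) = i := by omega
    have hkey := key _ hj
    rw [List.getElem?_reverse hjlt, hii] at hkey
    rw [List.getElem_reverse]
    have hkey' := hkey.symm
    rw [List.getElem?_eq_getElem h1, List.getElem?_eq_getElem hjlt] at hkey'
    exact Option.some.inj hkey'

theorem is_even_palindrome_spec : Claim_equal_is_even_palindrome := by
  intro s _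
  unfold Spec_is_even_palindrome is_even_palindrome is_even_palindrome_alt
  set cs := s.toList with hcs
  by_cases hp : cs.length % 2 ≠ 0
  · simp [hp]
  · rw [if_neg hp, if_neg hp]
    set m := cs.length / 2 with hm
    have hn : cs.length = 2 * m := by omega
    have harg : ((m : Nat) - 1 : Int) = (cs.length : Int) - 1 - m := by omega
    rw [harg, pvLoopA_eq cs m (by omega)]
    by_cases he : cs = cs.reverse
    · simp [← he]
    · have hne : cs.drop m ≠ cs.reverse.drop m := fun hd => he (halves cs m hn hd)
      simp [he, hne]
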